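-- pv_equiv track=rewrite | github.com/ekek54/BaekJoon_Python | 백준/Gold/16438. 원숭이 스포츠/원숭이 스포츠.py | split_team
-- ===== SOURCE A (Python) =====
-- def split_team(n, cnt):
--   if n < 2:
--     return 'A'
--   l = n // 2
--   r = n - l
--   if cnt == 0:
--     l_team = 'A' * l
--     r_team = 'B' * r
--     return l_team + r_team
--   else:
--     return split_team(l, cnt - 1) + split_team(r, cnt - 1)
-- ===== SOURCE B (Python) =====
-- def split_team(n, cnt):
--     if n < 2:
--         return 'A'
--     segs = [n]
--     steps = cnt
--     while steps != 0 and max(segs) >= 2: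
--         segs = [h for s in segs for h in ((s,) if s < 2 else (s // 2, s - s // 2))]
--         steps -= 1
--     return ''.join('A' if s < 2 else 'A' * (s // 2) + 'B' * (s - s // 2) for s in segs)
-- ===== Notes on version B (the rewrite author's own statement) =====
-- stated objective: alternative
-- what changed: Replaces A's top-down recursion with an iterative level-by-level split of a segment list followed by a single join-rendering pass.
import Mathlib
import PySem

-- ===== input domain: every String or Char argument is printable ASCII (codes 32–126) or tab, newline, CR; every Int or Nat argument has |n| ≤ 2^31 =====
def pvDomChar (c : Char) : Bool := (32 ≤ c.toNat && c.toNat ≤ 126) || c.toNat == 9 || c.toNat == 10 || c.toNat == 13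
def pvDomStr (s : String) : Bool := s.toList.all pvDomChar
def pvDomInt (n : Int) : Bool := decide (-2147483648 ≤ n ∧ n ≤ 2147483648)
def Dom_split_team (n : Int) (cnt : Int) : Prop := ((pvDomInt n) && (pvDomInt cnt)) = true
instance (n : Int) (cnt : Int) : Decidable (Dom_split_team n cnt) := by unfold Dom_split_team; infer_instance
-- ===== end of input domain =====

-- B replaces A's top-down recursion by an iterative level-by-level split of a segment list
-- followed by one rendering pass (objective: alternative decomposition, same asymptotic cost).

-- ===== PORT A =====
-- literal transliteration of A's recursion; terminates because both halves are smaller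
def split_team (n : Int) (cnt : Int) : String :=
  if n < 2 then "A"
  else
    let l := PySem.Int.floordiv n 2
    let r := n - l
    if cnt = 0 then
      String.ofList (List.replicate l.toNat 'A') ++ String.ofList (List.replicate r.toNat 'B')
    else split_team l (cnt - 1) ++ split_team r (cnt - 1)
termination_by n.toNat
decreasing_by
  · have h : PySem.Int.floordiv n 2 = n / 2 := PySem.Int.floordiv_eq_ediv_of_pos (by omega)
    simp only [h]; omega
  · have h : PySem.Int.floordiv n 2 = n / 2 := PySem.Int.floordiv_eq_ediv_of_pos (by omega)
    simp only [h]; omega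

-- ===== PORT B =====
-- one level of splitting: each segment ≥ 2 becomes its two halves, smaller ones are kept
def pvSplitStep (segs : List Int) : List Int :=
  segs.flatMap (fun s =>
    if s < 2 then [s] else [PySem.Int.floordiv s 2, s - PySem.Int.floordiv s 2])

-- max(segs) of Source B; segs is always nonempty with all elements ≥ 1, so fold with base 0 is exact
def pvMaxSeg (segs : List Int) : Int := segs.foldr max 0

theorem pvMaxSeg_lt {segs : List Int} {M : Int} (hM : 0 < M)
    (h : ∀ x ∈ segs, x < M) : pvMaxSeg segs < M := by
  induction segs with
  | nil => simpa [pvMaxSeg]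
  | cons a t ih =>
    simp only [pvMaxSeg, List.foldr] at *
    exact max_lt (h a (by simp)) (ih fun x hx => h x (by simp [hx]))

theorem le_pvMaxSeg {segs : List Int} {s : Int} (hs : s ∈ segs) : s ≤ pvMaxSeg segs := by
  induction segs with
  | nil => cases hs
  | cons a t ih =>
    rcases List.mem_cons.mp hs with rfl | hmem
    · exact le_max_left _ _
    · exact le_trans (ih hmem) (le_max_right _ _)

theorem pvSplitStep_shrinks (segs : List Int) (h2 : 2 ≤ pvMaxSeg segs) :
    pvMaxSeg (pvSplitStep segs) < pvMaxSeg segs := by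
  apply pvMaxSeg_lt (by omega)
  intro x hx
  simp only [pvSplitStep, List.mem_flatMap] at hx
  obtain ⟨s, hs, hxs⟩ := hx
  have hsle : s ≤ pvMaxSeg segs := le_pvMaxSeg hs
  by_cases hlt : s < 2
  · simp [hlt] at hxs; omega
  · have hd : PySem.Int.floordiv s 2 = s / 2 := PySem.Int.floordiv_eq_ediv_of_pos (by omega)
    simp only [if_neg hlt, List.mem_cons, List.not_mem_nil, or_false] at hxs
    rcases hxs with rfl | rfl <;> rw [hd] <;> omega

-- the while-loop of Source B
def pvLoop (segs : List Int) (steps : Int) : List Int :=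
  if steps ≠ 0 ∧ 2 ≤ pvMaxSeg segs then pvLoop (pvSplitStep segs) (steps - 1) else segs
termination_by (pvMaxSeg segs).toNat
decreasing_by
  have := pvSplitStep_shrinks segs (by omega)
  omega

-- the final ''.join generator of Source B
def pvRender (segs : List Int) : String :=
  String.join (segs.map (fun s =>
    if s < 2 then "A"
    else String.ofList (List.replicate (PySem.Int.floordiv s 2).toNat 'A') ++
         String.ofList (List.replicate (s - PySem.Int.floordiv s 2).toNat 'B')))

def split_team_alt (n : Int) (cnt : Int) : String :=
  if n < 2 then "A" else pvRender (pvLoop [n] cnt)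

-- ===== PRECONDITION & SPEC =====
def Spec_split_team (n : Int) (cnt : Int) (out : String) : Prop := out = split_team_alt n cnt
instance (n : Int) (cnt : Int) (out : String) : Decidable (Spec_split_team n cnt out) := by unfold Spec_split_team; infer_instance

-- ===== CLAIM (what is proved, stated in full; the proofs are below) =====
def Claim_equal_split_team : Prop := ∀ (n : Int) (cnt : Int), Dom_split_team n cnt → Spec_split_team n cnt (split_team n cnt)

-- ===== LEMMAS AND PROOFS =====

theorem split_team_small {n cnt : Int} (h : n < 2) : split_team n cnt = "A" := by
  rw [split_team]; simp [h]

theorem join_map_flatMap (f : Int → List Int) (g : Int → String) (l : List Int) :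
    String.join ((l.flatMap f).map g)
      = String.join (l.map (fun s => String.join ((f s).map g))) := by
  induction l with
  | nil => rfl
  | cons a t ih =>
    simp only [List.flatMap_cons, List.map_append, List.map_cons]
    simp [String.join_eq, List.flatten_append] at ih ⊢
    simp [ih]

theorem pvLoop_render (segs : List Int) (steps : Int) :
    pvRender (pvLoop segs steps)
      = String.join (segs.map (fun s => split_team s steps)) := by
  rw [pvLoop]
  by_cases hc : steps ≠ 0 ∧ 2 ≤ pvMaxSeg segs
  · rw [if_pos hc]
    have ih := pvLoop_render (pvSplitStep segs) (steps - 1)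
    rw [ih, pvSplitStep, join_map_flatMap]
    congr 1
    apply List.map_congr_left
    intro s _
    by_cases hs : s < 2
    · simp [hs, split_team_small hs, String.join_eq]
    · rw [split_team]
      simp only [if_neg hs, if_neg hc.1]
      simp [String.join_eq, String.ofList_append, String.ofList_toList]
  · rw [if_neg hc]
    unfold pvRender
    congr 1
    apply List.map_congr_left
    intro s hmem
    by_cases hs : s < 2
    · simp [hs, split_team_small hs]
    · -- s ≥ 2: the loop stopped, so steps = 0 (otherwise pvMaxSeg < 2 contradicts s ≤ max)
      have hst : steps = 0 := by
        by_contra hne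
        have := le_pvMaxSeg hmem
        exact hc ⟨hne, by omega⟩
      rw [split_team]
      simp [hs, hst]
termination_by (pvMaxSeg segs).toNat
decreasing_by
  have := pvSplitStep_shrinks segs (by omega)
  omega

-- ===== VERDICT (by name: the statement is the Claim_ definition above) =====
theorem split_team_spec : Claim_equal_split_team := by
  intro n cnt _
  unfold Spec_split_team split_team_alt
  by_cases h : n < 2
  · simp [h, split_team_small h]
  · rw [if_neg h, pvLoop_render]
    simp [String.join_eq]
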